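-- pv_equiv track=rewrite | github.com/snickrscodes/integralcalc | datagen.py | generate_binary_dist
-- ===== SOURCE A (Python) =====
-- def generate_binary_dist(max_ops):
--     # the maximum number of nodes in a tree with n operators is 2n+1
--     """
--     D[e][n] = the number of different binary trees with n nodes and e empty nodes
--         D(0, n) = 0
--         D(1, n) = C_n (n-th Catalan number)
--         D(e, n) = D(e - 1, n + 1) - D(e - 2, n + 1)
--     """
--     # that means as e increases by 1 n decreases by 1 too
--     D = []
--     D.append([0]*(2*max_ops+1))
--     catalans = [1]
--     for i in range(1, 2*max_ops):
--         catalans.append((4 * i - 2) * catalans[i - 1] // (i + 1))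
--     D.append(catalans)
--     for e in range(2, max_ops+1): # want a tree with n ops
--         D.append([D[e - 1][n + 1] - D[e - 2][n + 1] for n in range(2*max_ops-e+1)])
--     return D
-- ===== SOURCE B (Python) =====
-- def generate_binary_dist(max_ops):
--     # Closed form: D[e][n] is the ballot number e*C(2n+e,n)//(2n+e).
--     # Each row is produced independently from the formula, maintaining the
--     # binomial C(2n+e,n) as a running product along the row -- no Catalan
--     # precomputation and no dependence on previous rows.
--     def row(e, length):
--         out = []
--         c = 1  # C(2n+e, n) for the current n
--         for n in range(length):
--             out.append(e * c // (2 * n + e))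
--             c = c * ((2 * n + e + 1) * (2 * n + e + 2)) // ((n + 1) * (n + e + 1))
--         return out
--     D = [[0] * (2 * max_ops + 1)]
--     D.append(row(1, max(2 * max_ops, 1)))
--     for e in range(2, max_ops + 1):
--         D.append(row(e, 2 * max_ops - e + 1))
--     return D
-- ===== Notes on version B (the rewrite author's own statement) =====
-- stated objective: alternative
-- what changed: Replaces the Catalan precomputation and row-to-row DP recurrence with a direct closed-form ballot-number formula e*C(2n+e,n)//(2n+e) computed independently for each cell, so no prior-row dependence remains.
import Mathlib
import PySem

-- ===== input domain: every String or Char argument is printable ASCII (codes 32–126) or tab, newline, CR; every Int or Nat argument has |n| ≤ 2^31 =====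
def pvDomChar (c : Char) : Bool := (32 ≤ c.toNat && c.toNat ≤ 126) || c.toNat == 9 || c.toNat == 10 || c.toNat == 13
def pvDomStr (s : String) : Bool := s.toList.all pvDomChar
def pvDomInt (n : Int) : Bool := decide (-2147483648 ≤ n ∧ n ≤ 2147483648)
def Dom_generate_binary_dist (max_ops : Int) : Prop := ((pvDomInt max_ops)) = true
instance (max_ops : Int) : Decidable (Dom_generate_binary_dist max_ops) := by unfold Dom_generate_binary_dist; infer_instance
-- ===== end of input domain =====

-- B replaces A's Catalan-seeded row-to-row DP by the closed-form ballot number per cell (alternative algorithm, same cost).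

-- ===== PORT A =====
-- faithful transliteration of A; the pyGetD defaults are never taken (indices are provably in range)
def generate_binary_dist (max_ops : Int) : List (List Int) :=
  let D0 : List (List Int) := [List.replicate (2*max_ops+1).toNat 0]
  let catalans : List Int := (PySem.List.pyRange 1 (2*max_ops) 1).foldl
      (fun cs i => cs ++ [PySem.Int.floordiv ((4*i-2) * (PySem.List.pyGetD cs (i-1) 0)) (i+1)]) [1]
  let D1 := D0 ++ [catalans]
  (PySem.List.pyRange 2 (max_ops+1) 1).foldl
    (fun D e => D ++ [(PySem.List.pyRange 0 (2*max_ops-e+1) 1).map (fun n =>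
        PySem.List.pyGetD (PySem.List.pyGetD D (e-1) []) (n+1) 0
      - PySem.List.pyGetD (PySem.List.pyGetD D (e-2) []) (n+1) 0)]) D1

-- ===== PORT B =====
-- each row from the closed-form ballot number e*C(2n+e,n)//(2n+e); the pair state is
-- Source B's (out, c): the row built so far and the running binomial C(2n+e,n)
def pvRowB (e len : Int) : List Int :=
  ((PySem.List.pyRange 0 len 1).foldl
    (fun (p : List Int × Int) n =>
      (p.1 ++ [PySem.Int.floordiv (e * p.2) (2*n+e)],
       PySem.Int.floordiv (p.2 * ((2*n+e+1) * (2*n+e+2))) ((n+1)*(n+e+1)))) ([], 1)).1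

def generate_binary_dist_alt (max_ops : Int) : List (List Int) :=
  let D0 : List (List Int) := [List.replicate (2*max_ops+1).toNat 0]
  let D1 := D0 ++ [pvRowB 1 (max (2*max_ops) 1)]
  (PySem.List.pyRange 2 (max_ops+1) 1).foldl
    (fun D e => D ++ [pvRowB e (2*max_ops-e+1)]) D1

-- ===== PRECONDITION & SPEC =====
def Spec_generate_binary_dist (max_ops : Int) (out : List (List Int)) : Prop := out = generate_binary_dist_alt max_ops
instance (max_ops : Int) (out : List (List Int)) : Decidable (Spec_generate_binary_dist max_ops out) := by unfold Spec_generate_binary_dist; infer_instance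

-- ===== CLAIM (what is proved, stated in full; the proofs are below) =====
def Claim_equal_generate_binary_dist : Prop := ∀ (max_ops : Int), Dom_generate_binary_dist max_ops → Spec_generate_binary_dist max_ops (generate_binary_dist max_ops)

-- ===== LEMMAS AND PROOFS =====

-- the ballot number e/(2n+e) * C(2n+e,n), written subtraction-free over ℤ
def pvBal (e n : ℕ) : ℤ :=
  ((2*n+e-1).choose n : ℤ) - (if n = 0 then 0 else ((2*n+e-1).choose (n-1) : ℤ))

def pvRow (M e : ℕ) : List Int := (List.range (2*M+1-e)).map (fun n => pvBal e n)

def pvModel (M t : ℕ) : List (List Int) :=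
  List.replicate (2*M+1) (0:ℤ) :: (List.range t).map (fun j => pvRow M (j+1))

theorem pvBal_zero (n : ℕ) : pvBal 0 (n+1) = 0 := by
  unfold pvBal
  rw [if_neg (by omega : ¬ (n+1 = 0))]
  have h1 : 2*(n+1)+0-1 = 2*n+1 := by omega
  rw [h1]
  simp only [Nat.add_sub_cancel]
  rw [Nat.choose_symm_half]
  ring

theorem pvBal_one (n : ℕ) : pvBal 1 n = (catalan n : ℤ) := by
  cases n with
  | zero => simp [pvBal, catalan_zero]
  | succ n =>
    unfold pvBal
    have h1 : 2*(n+1)+1-1 = 2*(n+1) := by omega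
    have hF : (2*(n+1)).choose (n+1) * (n+1) = (2*(n+1)).choose n * (n+2) := by
      have h := Nat.choose_succ_right_eq (2*(n+1)) n
      have h2 : 2*(n+1) - n = n+2 := by omega
      rwa [h2] at h
    have hC : (n+1+1) * catalan (n+1) = (2*(n+1)).choose (n+1) :=
      succ_mul_catalan_eq_centralBinom (n+1)
    have hF' := congrArg (Nat.cast : ℕ → ℤ) hF
    have hC' := congrArg (Nat.cast : ℕ → ℤ) hC
    push_cast at hF' hC'
    rw [h1, if_neg (by omega : ¬ (n+1 = 0))]
    simp only [Nat.add_sub_cancel]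
    have hne : ((n:ℤ)+2) ≠ 0 := by positivity
    apply mul_left_cancel₀ hne
    ring_nf
    ring_nf at hF' hC'
    linarith

theorem pvBal_rec (e n : ℕ) : pvBal (e+2) n = pvBal (e+1) (n+1) - pvBal e (n+1) := by
  cases n with
  | zero =>
    unfold pvBal
    have h1 : 2*0+(e+2)-1 = e+1 := by omega
    have h2 : 2*1+(e+1)-1 = e+2 := by omega
    have h3 : 2*1+e-1 = e+1 := by omega
    rw [h1, h2, h3]
    simp [Nat.choose_one_right]
    ring
  | succ s =>
    unfold pvBal
    have h1 : 2*(s+1)+(e+2)-1 = 2*s+e+3 := by omega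
    have h2 : 2*(s+1+1)+(e+1)-1 = 2*s+e+4 := by omega
    have h3 : 2*(s+1+1)+e-1 = 2*s+e+3 := by omega
    have hp1 : (2*s+e+4).choose (s+2) = (2*s+e+3).choose (s+1) + (2*s+e+3).choose (s+2) :=
      Nat.choose_succ_succ' (2*s+e+3) (s+1)
    have hp2 : (2*s+e+4).choose (s+1) = (2*s+e+3).choose s + (2*s+e+3).choose (s+1) :=
      Nat.choose_succ_succ' (2*s+e+3) s
    rw [h1, h2, h3, if_neg (by omega : ¬ (s+1 = 0)), if_neg (by omega : ¬ (s+1+1 = 0))]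
    simp only [Nat.add_sub_cancel]
    rw [hp1, hp2]
    push_cast
    ring

theorem pvBal_mul (e n : ℕ) :
    ((2*n+(e+1) : ℕ) : ℤ) * pvBal (e+1) n = ((e+1 : ℕ) : ℤ) * ((2*n+(e+1)).choose n : ℤ) := by
  cases n with
  | zero => simp [pvBal]
  | succ s =>
    unfold pvBal
    have h1 : 2*(s+1)+(e+1)-1 = 2*s+e+2 := by omega
    have h2 : 2*(s+1)+(e+1) = 2*s+e+3 := by omega
    have hF1 : (2*s+e+2+1) * (2*s+e+2).choose (s+1) = (2*s+e+3).choose (s+2) * (s+2) :=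
      Nat.succ_mul_choose_eq (2*s+e+2) (s+1)
    have hF1b : (2*s+e+3).choose (s+2) * (s+2) = (2*s+e+3).choose (s+1) * (s+e+2) := by
      have h := Nat.choose_succ_right_eq (2*s+e+3) (s+1)
      have h4 : 2*s+e+3 - (s+1) = s+e+2 := by omega
      rwa [h4] at h
    have hF2 : (2*s+e+2+1) * (2*s+e+2).choose s = (2*s+e+3).choose (s+1) * (s+1) :=
      Nat.succ_mul_choose_eq (2*s+e+2) s
    have hF1' := congrArg (Nat.cast : ℕ → ℤ) (hF1.trans hF1b)
    have hF2' := congrArg (Nat.cast : ℕ → ℤ) hF2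
    push_cast at hF1' hF2'
    rw [h1, h2, if_neg (by omega : ¬ (s+1 = 0))]
    simp only [Nat.add_sub_cancel]
    push_cast
    ring_nf
    ring_nf at hF1' hF2'
    linarith

theorem pvCstep (E k : ℕ) :
    (2*k+E+1).choose k * ((2*k+E+2) * (2*k+E+3)) = (2*k+E+3).choose (k+1) * ((k+1)*(k+E+2)) := by
  have h1 : (2*k+E+2) * (2*k+E+1).choose k = (2*k+E+2).choose (k+1) * (k+1) :=
    Nat.succ_mul_choose_eq (2*k+E+1) k
  have h2 : (2*k+E+3) * (2*k+E+2).choose (k+1) = (2*k+E+3).choose (k+2) * (k+2) :=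
    Nat.succ_mul_choose_eq (2*k+E+2) (k+1)
  have h3 : (2*k+E+3).choose (k+2) * (k+2) = (2*k+E+3).choose (k+1) * (k+E+2) := by
    have h := Nat.choose_succ_right_eq (2*k+E+3) (k+1)
    rwa [show 2*k+E+3 - (k+1) = k+E+2 by omega] at h
  calc (2*k+E+1).choose k * ((2*k+E+2) * (2*k+E+3))
      = ((2*k+E+2) * (2*k+E+1).choose k) * (2*k+E+3) := by ring
    _ = ((2*k+E+2).choose (k+1) * (k+1)) * (2*k+E+3) := by rw [h1]
    _ = ((2*k+E+3) * (2*k+E+2).choose (k+1)) * (k+1) := by ring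
    _ = ((2*k+E+3).choose (k+2) * (k+2)) * (k+1) := by rw [h2]
    _ = ((2*k+E+3).choose (k+1) * (k+E+2)) * (k+1) := by rw [h3]
    _ = (2*k+E+3).choose (k+1) * ((k+1)*(k+E+2)) := by ring

theorem pvRowB_aux (E : ℕ) : ∀ L : ℕ,
    (PySem.List.pyRange 0 ((L:ℕ):ℤ) 1).foldl
      (fun (p : List Int × Int) n =>
        (p.1 ++ [PySem.Int.floordiv (((E+1:ℕ):ℤ) * p.2) (2*n+((E+1:ℕ):ℤ))],
         PySem.Int.floordiv (p.2 * ((2*n+((E+1:ℕ):ℤ)+1) * (2*n+((E+1:ℕ):ℤ)+2)))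
           ((n+1)*(n+((E+1:ℕ):ℤ)+1)))) ([], 1)
    = ((List.range L).map (fun n => pvBal (E+1) n), ((2*L+(E+1)).choose L : ℤ)) := by
  intro L
  induction L with
  | zero =>
    rw [show ((0:ℕ):ℤ) = (0:ℤ) by norm_num, PySem.List.pyRange_one_eq_nil (le_refl (0:ℤ))]
    simp
  | succ L ih =>
    rw [show ((L+1:ℕ):ℤ) = ((L:ℕ):ℤ)+1 by push_cast; ring,
        PySem.List.pyRange_one_succ_right (by omega : (0:ℤ) ≤ ((L:ℕ):ℤ)),
        List.foldl_append, ih]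
    simp only [List.foldl_cons, List.foldl_nil]
    have hmul := pvBal_mul E L
    have hnum1 : ((E+1:ℕ):ℤ) * (((2*L+(E+1)).choose L : ℕ):ℤ)
        = (2*((L:ℕ):ℤ)+((E+1:ℕ):ℤ)) * pvBal (E+1) L := by
      push_cast at hmul ⊢
      linarith [hmul]
    have hNat' := congrArg (Nat.cast : ℕ → ℤ) (pvCstep E L)
    push_cast at hNat'
    have hnum2 : (((2*L+(E+1)).choose L : ℕ):ℤ)
          * ((2*((L:ℕ):ℤ)+((E+1:ℕ):ℤ)+1) * (2*((L:ℕ):ℤ)+((E+1:ℕ):ℤ)+2))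
        = (((2*L+E+3).choose (L+1) : ℕ):ℤ) * ((((L:ℕ):ℤ)+1)*(((L:ℕ):ℤ)+((E+1:ℕ):ℤ)+1)) := by
      rw [show 2*L+(E+1) = 2*L+E+1 by omega]
      push_cast
      linear_combination hNat'
    rw [hnum1, hnum2,
        PySem.Int.floordiv_eq_ediv_of_pos (by positivity : (0:ℤ) < 2*((L:ℕ):ℤ)+((E+1:ℕ):ℤ)),
        PySem.Int.floordiv_eq_ediv_of_pos
          (by positivity : (0:ℤ) < (((L:ℕ):ℤ)+1)*(((L:ℕ):ℤ)+((E+1:ℕ):ℤ)+1)),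
        Int.mul_ediv_cancel_left _ (by positivity : (2*((L:ℕ):ℤ)+((E+1:ℕ):ℤ)) ≠ 0),
        Int.mul_ediv_cancel _ (by positivity : ((((L:ℕ):ℤ)+1)*(((L:ℕ):ℤ)+((E+1:ℕ):ℤ)+1)) ≠ 0)]
    rw [List.range_succ, List.map_append]
    rw [show 2*(L+1)+(E+1) = 2*L+E+3 by omega]
    rfl

theorem pvRowB_eq (e : ℤ) (E L : ℕ) (he : e = ((E+1:ℕ):ℤ)) :
    pvRowB e ((L:ℕ):ℤ) = (List.range L).map (fun n => pvBal (E+1) n) := by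
  subst he
  unfold pvRowB
  rw [pvRowB_aux E L]

theorem pvCatStep (k : ℕ) : (4*k+2) * catalan k = (k+2) * catalan (k+1) := by
  have h1 := Nat.succ_mul_centralBinom_succ k
  have h2 := succ_mul_catalan_eq_centralBinom k
  have h3 := succ_mul_catalan_eq_centralBinom (k+1)
  apply Nat.eq_of_mul_eq_mul_left (show 0 < k+1 by omega)
  calc (k+1) * ((4*k+2) * catalan k)
      = (2*(2*k+1)) * ((k+1) * catalan k) := by ring
    _ = 2*(2*k+1) * k.centralBinom := by rw [h2]
    _ = (k+1) * (k+1).centralBinom := h1.symm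
    _ = (k+1) * ((k+1+1) * catalan (k+1)) := by rw [h3]
    _ = (k+1) * ((k+2) * catalan (k+1)) := by ring_nf

theorem pvCatalans : ∀ k : ℕ,
    (PySem.List.pyRange 1 (1+(k:ℤ)) 1).foldl
      (fun cs i => cs ++ [PySem.Int.floordiv ((4*i-2) * (PySem.List.pyGetD cs (i-1) 0)) (i+1)]) [1]
    = (List.range (k+1)).map (fun j => (catalan j : ℤ)) := by
  intro k
  induction k with
  | zero =>
    rw [show (1:ℤ)+((0:ℕ):ℤ) = (1:ℤ) by norm_num, PySem.List.pyRange_one_eq_nil (le_refl (1:ℤ))]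
    simp [catalan_zero]
  | succ k ih =>
    have hb : (1:ℤ)+((k+1:ℕ):ℤ) = (1+((k:ℕ):ℤ))+1 := by push_cast; ring
    rw [hb, PySem.List.pyRange_one_succ_right (by omega : (1:ℤ) ≤ 1+((k:ℕ):ℤ)),
        List.foldl_append, ih]
    simp only [List.foldl_cons, List.foldl_nil]
    have hidx : (1:ℤ)+((k:ℕ):ℤ)-1 = ((k:ℕ):ℤ) := by ring
    rw [hidx, PySem.List.pyGetD_natCast,
        PySem.List.getD_map_range (fun j => (catalan j : ℤ)) (k+1) k 0 (by omega)]
    have hNat := pvCatStep k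
    have hNat' := congrArg (Nat.cast : ℕ → ℤ) hNat
    push_cast at hNat'
    have hnum : (4*((1:ℤ)+(k:ℤ))-2) * ((catalan k : ℕ) : ℤ) = ((catalan (k+1) : ℕ) : ℤ) * ((1+(k:ℤ))+1) := by
      linarith [hNat']
    rw [hnum, PySem.Int.floordiv_eq_ediv_of_pos (by positivity : (0:ℤ) < (1+((k:ℕ):ℤ))+1),
        Int.mul_ediv_cancel _ (by positivity : ((1+((k:ℕ):ℤ))+1) ≠ 0)]
    rw [List.range_succ (n := k+1), List.map_append]
    simp

theorem pvRow_getD (M e n : ℕ) (h : n < 2*M+1-e) : (pvRow M e).getD n 0 = pvBal e n :=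
  PySem.List.getD_map_range (fun n => pvBal e n) (2*M+1-e) n 0 h

theorem pvModel_getD (M t j : ℕ) (hj : j ≤ t) :
    (pvModel M t).getD j [] = if j = 0 then List.replicate (2*M+1) (0:ℤ) else pvRow M j := by
  cases j with
  | zero => rfl
  | succ s =>
    unfold pvModel
    rw [if_neg (by omega : ¬ (s+1 = 0))]
    show ((List.range t).map (fun j => pvRow M (j+1))).getD s [] = pvRow M (s+1)
    exact PySem.List.getD_map_range (fun j => pvRow M (j+1)) t s [] (by omega)

theorem pvRepl_getD (L i : ℕ) : (List.replicate L (0:ℤ)).getD i 0 = 0 := by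
  rw [List.getD_eq_getElem?_getD, List.getElem?_replicate]
  split <;> rfl

theorem pvModel_entry (M t j n : ℕ) (hj : j ≤ t) (hn : n+1 < 2*M+1-j) :
    ((pvModel M t).getD j []).getD (n+1) 0 = pvBal j (n+1) := by
  rw [pvModel_getD M t j hj]
  by_cases hj0 : j = 0
  · subst hj0
    rw [if_pos rfl, pvRepl_getD, pvBal_zero n]
  · rw [if_neg hj0, pvRow_getD M j (n+1) hn]

theorem pvModel_succ (M t : ℕ) : pvModel M (t+1) = pvModel M t ++ [pvRow M (t+1)] := by
  unfold pvModel
  rw [List.range_succ, List.map_append]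
  simp

theorem pvAfold (M : ℕ) : ∀ t : ℕ, t + 1 ≤ M →
    (PySem.List.pyRange 2 (2+(t:ℤ)) 1).foldl
      (fun D e => D ++ [(PySem.List.pyRange 0 (2*((M:ℕ):ℤ)-e+1) 1).map (fun n =>
          PySem.List.pyGetD (PySem.List.pyGetD D (e-1) []) (n+1) 0
        - PySem.List.pyGetD (PySem.List.pyGetD D (e-2) []) (n+1) 0)]) (pvModel M 1)
    = pvModel M (t+1) := by
  intro t
  induction t with
  | zero =>
    intro _
    rw [show (2:ℤ)+((0:ℕ):ℤ) = (2:ℤ) by norm_num, PySem.List.pyRange_one_eq_nil (le_refl (2:ℤ))]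
    rfl
  | succ s ih =>
    intro hs
    have hb : (2:ℤ)+((s+1:ℕ):ℤ) = (2+((s:ℕ):ℤ))+1 := by push_cast; ring
    rw [hb, PySem.List.pyRange_one_succ_right (by omega : (2:ℤ) ≤ 2+((s:ℕ):ℤ)),
        List.foldl_append, ih (by omega)]
    simp only [List.foldl_cons, List.foldl_nil]
    have hi1 : (2+((s:ℕ):ℤ))-1 = ((s+1:ℕ):ℤ) := by push_cast; ring
    have hi2 : (2+((s:ℕ):ℤ))-2 = ((s:ℕ):ℤ) := by ring
    have hK : 2*((M:ℕ):ℤ)-(2+((s:ℕ):ℤ))+1 = ((2*M-s-1 : ℕ):ℤ) := by omega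
    rw [hi1, hi2, hK, PySem.List.pyGetD_natCast (pvModel M (s+1)) (s+1) [],
        PySem.List.pyGetD_natCast (pvModel M (s+1)) s [],
        PySem.List.pyRange_zero_nat, List.map_map, pvModel_succ M (s+1)]
    congr 1
    congr 1
    unfold pvRow
    rw [show 2*M+1-(s+2) = 2*M-s-1 by omega]
    apply List.map_congr_left
    intro n hn
    have hn' : n < 2*M-s-1 := List.mem_range.mp hn
    simp only [Function.comp]
    have hc : ((n:ℕ):ℤ)+1 = ((n+1 : ℕ):ℤ) := by push_cast; ring
    rw [hc, PySem.List.pyGetD_natCast, PySem.List.pyGetD_natCast,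
        pvModel_entry M (s+1) (s+1) n (le_refl _) (by omega),
        pvModel_entry M (s+1) s n (by omega) (by omega),
        ← pvBal_rec s n]

theorem pvModel_cons (M t : ℕ) :
    pvModel M (t+1)
    = List.replicate (2*M+1) (0:ℤ) :: pvRow M 1 :: (List.range t).map (fun k => pvRow M (k+2)) := by
  unfold pvModel
  rw [List.range_succ_eq_map, List.map_cons, List.map_map]
  rfl

theorem pvB_eq_model (M : ℕ) (hM : 1 ≤ M) : generate_binary_dist_alt (M:ℤ) = pvModel M M := by
  simp only [generate_binary_dist_alt]
  rw [PySem.List.foldl_append_singleton_eq_map]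
  have hmax : max (2*((M:ℕ):ℤ)) 1 = ((2*M : ℕ):ℤ) := by
    rw [max_eq_left (by omega : (1:ℤ) ≤ 2*((M:ℕ):ℤ))]; omega
  have hrow1 : pvRowB 1 ((2*M : ℕ):ℤ) = pvRow M 1 := by
    rw [pvRowB_eq 1 0 (2*M) (by norm_num)]
    unfold pvRow
    rw [show 2*M+1-1 = 2*M by omega]
  rw [hmax, hrow1]
  have hb : ((M:ℕ):ℤ)+1 = 2+((M-1 : ℕ):ℤ) := by omega
  rw [hb, PySem.List.pyRange_one 2 (2+((M-1:ℕ):ℤ)),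
      show ((2:ℤ)+((M-1:ℕ):ℤ)-2).toNat = M-1 by omega, List.map_map]
  have hrows : ∀ k ∈ List.range (M-1),
      ((fun e => pvRowB e (2*((M:ℕ):ℤ)-e+1)) ∘ (fun k : ℕ => 2+(k:ℤ))) k = pvRow M (k+2) := by
    intro k hk
    have hk' : k < M-1 := List.mem_range.mp hk
    simp only [Function.comp]
    have hK : 2*((M:ℕ):ℤ)-(2+(k:ℤ))+1 = ((2*M-k-1 : ℕ):ℤ) := by omega
    rw [hK, pvRowB_eq (2+(k:ℤ)) (k+1) (2*M-k-1) (by push_cast; ring)]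
    unfold pvRow
    rw [show 2*M+1-(k+2) = 2*M-k-1 by omega]
  rw [List.map_congr_left hrows]
  have hMM : pvModel M M = pvModel M ((M-1)+1) := by rw [Nat.sub_add_cancel hM]
  rw [hMM, pvModel_cons]
  rw [show (2*((M:ℕ):ℤ)+1).toNat = 2*M+1 by omega]
  rfl

theorem pvA_eq_model (M : ℕ) (hM : 1 ≤ M) : generate_binary_dist (M:ℤ) = pvModel M M := by
  simp only [generate_binary_dist]
  have hcat : (PySem.List.pyRange 1 (2*((M:ℕ):ℤ)) 1).foldl
      (fun cs i => cs ++ [PySem.Int.floordiv ((4*i-2) * (PySem.List.pyGetD cs (i-1) 0)) (i+1)]) [1]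
      = (List.range (2*M-1+1)).map (fun j => (catalan j : ℤ)) := by
    rw [show 2*((M:ℕ):ℤ) = 1+((2*M-1 : ℕ):ℤ) by omega]
    exact pvCatalans (2*M-1)
  rw [hcat]
  have hrow1 : (List.range (2*M-1+1)).map (fun j => (catalan j : ℤ)) = pvRow M 1 := by
    unfold pvRow
    rw [show 2*M+1-1 = 2*M-1+1 by omega]
    exact List.map_congr_left (fun j _ => (pvBal_one j).symm)
  rw [hrow1]
  have hinit : ([List.replicate (2*((M:ℕ):ℤ)+1).toNat (0:ℤ)] ++ [pvRow M 1]) = pvModel M 1 := by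
    unfold pvModel
    rw [show (2*((M:ℕ):ℤ)+1).toNat = 2*M+1 by omega]
    rfl
  rw [hinit]
  rw [show ((M:ℕ):ℤ)+1 = 2+((M-1 : ℕ):ℤ) by omega]
  rw [pvAfold M (M-1) (by omega)]
  rw [Nat.sub_add_cancel hM]

theorem pvNonpos (m : Int) (hm : m ≤ 0) : generate_binary_dist m = generate_binary_dist_alt m := by
  simp only [generate_binary_dist, generate_binary_dist_alt]
  have hb0 : pvRowB 1 1 = [1] := by decide
  rw [PySem.List.pyRange_one_eq_nil (show m+1 ≤ (2:ℤ) by omega),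
      PySem.List.pyRange_one_eq_nil (show 2*m ≤ (1:ℤ) by omega),
      max_eq_right (show 2*m ≤ (1:ℤ) by omega), hb0]
  simp

-- ===== VERDICT (by name: the statement is the Claim_ definition above) =====
theorem generate_binary_dist_spec : Claim_equal_generate_binary_dist := by
  intro m _
  unfold Spec_generate_binary_dist
  by_cases hm : m ≤ 0
  · exact pvNonpos m hm
  · have hM : m = ((m.toNat : ℕ) : ℤ) := by omega
    rw [hM, pvA_eq_model m.toNat (by omega), pvB_eq_model m.toNat (by omega)]
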